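-- pv_equiv track=rewrite | github.com/tangweigang-jpg/Doramagic | packages/extraction_agent/doramagic_extraction_agent/sop/constraint_synthesis.py | _build_synthesis_summary
-- ===== SOURCE A (Python) =====
-- _REVIEW_KINDS = {"operational_lesson", "claim_boundary"}
--
-- _WHEN_ACTION_CHARS = 50
--
-- def _build_synthesis_summary(merged: list[dict], max_items: int = 200) -> str:
--     """Build concise summary of constraints for the Instructor call.
--
--     Only includes ``operational_lesson`` and ``claim_boundary`` constraints
--     so the LLM focuses on the candidates that may need upgrading.
--
--     Format per entry::
--
--         [{index}] kind={kind} severity={severity}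
--           when: {when[:50]}...
--           action: {action[:50]}...
--     """
--     lines: list[str] = [
--         "以下是需要审查的约束条目（仅包含 operational_lesson / claim_boundary）：\n"
--     ]
--     included = 0
--     for idx, constraint in enumerate(merged):
--         kind = constraint.get("constraint_kind", "")
--         if kind not in _REVIEW_KINDS:
--             continue
--         if included >= max_items:
--             remaining = sum(
--                 1 for c in merged[idx:] if c.get("constraint_kind", "") in _REVIEW_KINDS
--             )
--             lines.append(f"\n... 还有 {remaining} 条未列出（已达 {max_items} 条上限）")
--             break
--
--         severity = constraint.get("severity", "")
--         when_raw = constraint.get("when", "")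
--         action_raw = constraint.get("action", "")
--         when_preview = when_raw[:_WHEN_ACTION_CHARS]
--         action_preview = action_raw[:_WHEN_ACTION_CHARS]
--         ellipsis_w = "..." if len(when_raw) > _WHEN_ACTION_CHARS else ""
--         ellipsis_a = "..." if len(action_raw) > _WHEN_ACTION_CHARS else ""
--
--         lines.append(
--             f"[{idx}] kind={kind} severity={severity}\n"
--             f"  when: {when_preview}{ellipsis_w}\n"
--             f"  action: {action_preview}{ellipsis_a}"
--         )
--         included += 1
--
--     if included == 0:
--         lines.append("（无需审查的约束条目）")
--
--     return "\n".join(lines)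
-- ===== SOURCE B (Python) =====
-- _REVIEW_KINDS = {"operational_lesson", "claim_boundary"}
--
-- _WHEN_ACTION_CHARS = 50
--
--
-- def _format_entry(idx: int, constraint: dict) -> str:
--     kind = constraint.get("constraint_kind", "")
--     severity = constraint.get("severity", "")
--     when_raw = constraint.get("when", "")
--     action_raw = constraint.get("action", "")
--     ellipsis_w = "..." if len(when_raw) > _WHEN_ACTION_CHARS else ""
--     ellipsis_a = "..." if len(action_raw) > _WHEN_ACTION_CHARS else ""
--     return (
--         f"[{idx}] kind={kind} severity={severity}\n"
--         f"  when: {when_raw[:_WHEN_ACTION_CHARS]}{ellipsis_w}\n"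
--         f"  action: {action_raw[:_WHEN_ACTION_CHARS]}{ellipsis_a}"
--     )
--
--
-- def _build_synthesis_summary(merged: list[dict], max_items: int = 200) -> str:
--     reviewable = [
--         (idx, c)
--         for idx, c in enumerate(merged)
--         if c.get("constraint_kind", "") in _REVIEW_KINDS
--     ]
--     lines = [
--         "以下是需要审查的约束条目（仅包含 operational_lesson / claim_boundary）：\n"
--     ]
--     if not reviewable:
--         lines.append("（无需审查的约束条目）")
--     else:
--         lines.extend(_format_entry(idx, c) for idx, c in reviewable[:max_items])
--         if len(reviewable) > max_items:
--             lines.append(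
--                 f"\n... 还有 {len(reviewable) - max_items} 条未列出（已达 {max_items} 条上限）"
--             )
--     return "\n".join(lines)
-- ===== Notes on version B (the rewrite author's own statement) =====
-- stated objective: simpler
-- what changed: A's fused enumerate-loop with continue/break, a running included counter, a mid-loop rescan of merged[idx:] for the remaining count, and a post-loop leftover-state check is replaced by one filtered pass that builds reviewable = [(idx, c) ...] and then pure slice/length arithmetic (reviewable[:max_items], len(reviewable) - max_items).
-- intended difference: When max_items <= 0 and merged contains a reviewable constraint, A returns the header, the remaining-count line, and additionally the contradictory '（无需审查的约束条目）' (nothing-to-review) line left over from its included==0 check; B returns the same summary without that leftover line, which is the intended output. — e.g. on _build_synthesis_summary([[("constraint_kind", "claim_boundary")]], 0): A returns "以下是需要审查的约束条目（仅包含 operational_lesson / claim_boundary）：\n\n\n... 还有 1 条未列出（已达 0 条上限）\n（无需审查的约束条目）", B returns "以下是需要审查的约束条目（仅包含 operational_lesson / claim_boundary）：\n\n\n... 还有 1 条未列出（已达 0 条上限）"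
import Mathlib
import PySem

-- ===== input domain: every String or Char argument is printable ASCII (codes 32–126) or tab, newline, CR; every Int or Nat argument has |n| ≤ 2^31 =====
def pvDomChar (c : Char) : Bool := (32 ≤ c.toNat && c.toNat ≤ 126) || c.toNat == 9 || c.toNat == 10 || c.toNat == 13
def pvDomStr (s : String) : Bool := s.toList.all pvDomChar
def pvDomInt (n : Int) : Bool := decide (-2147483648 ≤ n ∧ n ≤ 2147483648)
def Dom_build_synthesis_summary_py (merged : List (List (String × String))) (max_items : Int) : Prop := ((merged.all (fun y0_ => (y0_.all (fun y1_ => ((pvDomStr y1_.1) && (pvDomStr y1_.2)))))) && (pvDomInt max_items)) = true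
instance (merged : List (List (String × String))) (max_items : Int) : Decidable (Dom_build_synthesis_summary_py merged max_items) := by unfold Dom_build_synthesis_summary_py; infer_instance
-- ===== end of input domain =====

-- B replaces A's fused scan-with-break-and-rescan by one filtered enumerate pass plus slice
-- arithmetic (objective: simpler); on max_items ≤ 0 with reviewable entries present B drops A's
-- leftover-state "（无需审查的约束条目）" line (see D_ below).

-- shared module constants (Python module level: _REVIEW_KINDS, _WHEN_ACTION_CHARS, literals)
def pvReviewKinds : PySem.Set String := PySem.Set.ofList ["operational_lesson", "claim_boundary"]
def pvWhenActionChars : Int := 50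
def pvHeader : String := "以下是需要审查的约束条目（仅包含 operational_lesson / claim_boundary）：\n"
def pvEmptyMsg : String := "（无需审查的约束条目）"
-- constraint.get(key, "") on the association-list dict (first match)
def pvGet (c : List (String × String)) (k : String) (dflt : String) : String :=
  (PySem.Dict.mk c).getD k dflt

-- ===== PORT A =====
-- the for-loop over enumerate(merged) with `continue`, the `break` arm (which rescans
-- merged[idx:]) and the running `included` counter; returns (lines, included)
def aLoop (merged : List (List (String × String))) (max_items : Int) :
    List (Int × List (String × String)) → List String → Int → List String × Int
  | [], lines, included => (lines, included)
  | (idx, constraint) :: rest, lines, included =>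
    let kind := pvGet constraint "constraint_kind" ""
    if !(PySem.Set.contains pvReviewKinds kind) then
      aLoop merged max_items rest lines included
    else if included ≥ max_items then
      let remaining : Int :=
        ((PySem.List.slice merged (some idx) none).countP
          (fun c => PySem.Set.contains pvReviewKinds (pvGet c "constraint_kind" "")) : Int)
      (lines ++ ["\n... 还有 " ++ PySem.Int.toStr remaining ++ " 条未列出（已达 "
                  ++ PySem.Int.toStr max_items ++ " 条上限）"], included)
    else
      let severity := pvGet constraint "severity" ""
      let when_raw := pvGet constraint "when" ""
      let action_raw := pvGet constraint "action" ""
      let when_preview := PySem.Str.slice when_raw none (some pvWhenActionChars)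
      let action_preview := PySem.Str.slice action_raw none (some pvWhenActionChars)
      let ellipsis_w := if PySem.Str.len when_raw > pvWhenActionChars then "..." else ""
      let ellipsis_a := if PySem.Str.len action_raw > pvWhenActionChars then "..." else ""
      aLoop merged max_items rest
        (lines ++ ["[" ++ PySem.Int.toStr idx ++ "] kind=" ++ kind ++ " severity=" ++ severity
                    ++ "\n  when: " ++ when_preview ++ ellipsis_w
                    ++ "\n  action: " ++ action_preview ++ ellipsis_a])
        (included + 1)

def build_synthesis_summary_py (merged : List (List (String × String))) (max_items : Int) : String :=
  let r := aLoop merged max_items (PySem.List.enumerate merged 0) [pvHeader] 0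
  let lines := if r.2 == 0 then r.1 ++ [pvEmptyMsg] else r.1
  PySem.Str.join "\n" lines

-- ===== PORT B =====
-- Source B's _format_entry helper
def bEntry (idx : Int) (constraint : List (String × String)) : String :=
  let kind := pvGet constraint "constraint_kind" ""
  let severity := pvGet constraint "severity" ""
  let when_raw := pvGet constraint "when" ""
  let action_raw := pvGet constraint "action" ""
  let ellipsis_w := if PySem.Str.len when_raw > pvWhenActionChars then "..." else ""
  let ellipsis_a := if PySem.Str.len action_raw > pvWhenActionChars then "..." else ""
  "[" ++ PySem.Int.toStr idx ++ "] kind=" ++ kind ++ " severity=" ++ severity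
    ++ "\n  when: " ++ PySem.Str.slice when_raw none (some pvWhenActionChars) ++ ellipsis_w
    ++ "\n  action: " ++ PySem.Str.slice action_raw none (some pvWhenActionChars) ++ ellipsis_a

def build_synthesis_summary_py_alt (merged : List (List (String × String))) (max_items : Int) : String :=
  let reviewable := (PySem.List.enumerate merged 0).filter
      (fun ic => PySem.Set.contains pvReviewKinds (pvGet ic.2 "constraint_kind" ""))
  let lines : List String :=
    if reviewable.isEmpty then [pvHeader, pvEmptyMsg]
    else pvHeader ::
      ((PySem.List.slice reviewable none (some max_items)).map (fun ic => bEntry ic.1 ic.2)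
        ++ (if (reviewable.length : Int) > max_items then
              ["\n... 还有 " ++ PySem.Int.toStr ((reviewable.length : Int) - max_items)
                ++ " 条未列出（已达 " ++ PySem.Int.toStr max_items ++ " 条上限）"]
            else []))
  PySem.Str.join "\n" lines

-- ===== PRECONDITION & SPEC =====
-- When max_items ≤ 0 and merged contains a reviewable constraint, A appends the remaining-count
-- line and then, because its `included` counter is still 0, also the contradictory
-- "（无需审查的约束条目）" ("nothing to review") line; B returns the same summary without that
-- leftover-state line, which is the intended output.
def D_build_synthesis_summary_py (merged : List (List (String × String))) (max_items : Int) : Prop :=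
  max_items ≤ 0 ∧ ∃ c ∈ merged, PySem.Set.contains pvReviewKinds (pvGet c "constraint_kind" "") = true
instance (merged : List (List (String × String))) (max_items : Int) : Decidable (D_build_synthesis_summary_py merged max_items) := by unfold D_build_synthesis_summary_py; infer_instance

def Spec_build_synthesis_summary_py (merged : List (List (String × String))) (max_items : Int) (out : String) : Prop := ¬ D_build_synthesis_summary_py merged max_items → out = build_synthesis_summary_py_alt merged max_items
instance (merged : List (List (String × String))) (max_items : Int) (out : String) : Decidable (Spec_build_synthesis_summary_py merged max_items out) := by unfold Spec_build_synthesis_summary_py; infer_instance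

def pvDiffWitness_build_synthesis_summary_py : (List (List (String × String))) × Int :=
  ([[("constraint_kind", "claim_boundary")]], 0)
def pvDiffWitnessOut_build_synthesis_summary_py : String × String :=
  ("以下是需要审查的约束条目（仅包含 operational_lesson / claim_boundary）：\n\n\n... 还有 1 条未列出（已达 0 条上限）\n（无需审查的约束条目）",
   "以下是需要审查的约束条目（仅包含 operational_lesson / claim_boundary）：\n\n\n... 还有 1 条未列出（已达 0 条上限）")

-- ===== CLAIM (what is proved, stated in full; the proofs are below) =====
def Claim_unchanged_build_synthesis_summary_py : Prop := ∀ (merged : List (List (String × String))) (max_items : Int), Dom_build_synthesis_summary_py merged max_items → Spec_build_synthesis_summary_py merged max_items (build_synthesis_summary_py merged max_items)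
def Claim_changed_build_synthesis_summary_py : Prop := Dom_build_synthesis_summary_py (pvDiffWitness_build_synthesis_summary_py.1) (pvDiffWitness_build_synthesis_summary_py.2) ∧ D_build_synthesis_summary_py (pvDiffWitness_build_synthesis_summary_py.1) (pvDiffWitness_build_synthesis_summary_py.2) ∧ build_synthesis_summary_py (pvDiffWitness_build_synthesis_summary_py.1) (pvDiffWitness_build_synthesis_summary_py.2) = pvDiffWitnessOut_build_synthesis_summary_py.1 ∧ build_synthesis_summary_py_alt (pvDiffWitness_build_synthesis_summary_py.1) (pvDiffWitness_build_synthesis_summary_py.2) = pvDiffWitnessOut_build_synthesis_summary_py.2 ∧ pvDiffWitnessOut_build_synthesis_summary_py.1 ≠ pvDiffWitnessOut_build_synthesis_summary_py.2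

def Claim_exact_build_synthesis_summary_py : Prop := ∀ (merged : List (List (String × String))) (max_items : Int), Dom_build_synthesis_summary_py merged max_items → D_build_synthesis_summary_py merged max_items → build_synthesis_summary_py merged max_items ≠ build_synthesis_summary_py_alt merged max_items

-- ===== LEMMAS AND PROOFS =====

-- the reviewable test (A's `kind in _REVIEW_KINDS`, B's comprehension condition)
def pvIsRev (c : List (String × String)) : Bool :=
  PySem.Set.contains pvReviewKinds (pvGet c "constraint_kind" "")

-- the remaining-count line
def pvRemMsg (m n : Int) : String :=
  "\n... 还有 " ++ PySem.Int.toStr n ++ " 条未列出（已达 " ++ PySem.Int.toStr m ++ " 条上限）"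

lemma filterEnum_length (xs : List (List (String × String))) (s : Int) :
    ((PySem.List.enumerate xs s).filter (fun p => pvIsRev p.2)).length = xs.countP pvIsRev := by
  rw [← List.countP_eq_length_filter]
  conv_rhs => rw [← PySem.List.map_snd_enumerate xs s]
  rw [List.countP_map]; rfl

lemma aLoop_none (merged : List (List (String × String))) (m : Int) :
    ∀ (suffix : List (List (String × String))) (s : Int) (lines : List String) (inc : Int),
      (∀ c ∈ suffix, pvIsRev c = false) →
      aLoop merged m (PySem.List.enumerate suffix s) lines inc = (lines, inc) := by
  intro suffix
  induction suffix with
  | nil => intro s lines inc _; simp [PySem.List.enumerate_nil, aLoop]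
  | cons c tl ih =>
    intro s lines inc h
    have hc : PySem.Set.contains pvReviewKinds (pvGet c "constraint_kind" "") = false := by
      simpa [pvIsRev] using h c (by simp)
    rw [PySem.List.enumerate_cons]
    simp only [aLoop, hc]
    exact ih (s + 1) lines inc (fun x hx => h x (by simp [hx]))

lemma aLoop_full (merged : List (List (String × String))) (m : Int) :
    ∀ (suffix : List (List (String × String))) (j : Nat) (lines : List String) (inc : Int),
      merged.drop j = suffix → m ≤ inc →
      aLoop merged m (PySem.List.enumerate suffix (j : Int)) lines inc =
        (if suffix.countP pvIsRev = 0 then lines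
         else lines ++ [pvRemMsg m (suffix.countP pvIsRev : Int)], inc) := by
  intro suffix
  induction suffix with
  | nil => intro j lines inc _ _; simp [PySem.List.enumerate_nil, aLoop]
  | cons c tl ih =>
    intro j lines inc hdrop hm
    have hdrop' : merged.drop (j + 1) = tl := by
      rw [← List.tail_drop, hdrop]; rfl
    rw [PySem.List.enumerate_cons]
    by_cases hc : pvIsRev c = true
    · have hc' : PySem.Set.contains pvReviewKinds (pvGet c "constraint_kind" "") = true := by
        simpa [pvIsRev] using hc
      have hcnt : (c :: tl).countP pvIsRev ≠ 0 := by simp [hc]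
      simp only [aLoop, hc', Bool.not_true]
      rw [if_neg (by simp), if_pos hm, if_neg hcnt]
      rw [PySem.List.slice_from_natCast, hdrop]
      simp only [pvRemMsg]; rfl
    · have hc' : PySem.Set.contains pvReviewKinds (pvGet c "constraint_kind" "") = false := by
        simpa [pvIsRev] using hc
      simp only [aLoop, hc', Bool.not_false]
      rw [if_pos trivial]
      have hcast : (j : Int) + 1 = ((j + 1 : Nat) : Int) := by push_cast; ring
      rw [hcast, ih (j + 1) lines inc hdrop' hm]
      simp [hc]

lemma aLoop_run (merged : List (List (String × String))) (m : Int) :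
    ∀ (suffix : List (List (String × String))) (j : Nat) (lines : List String) (inc : Int),
      merged.drop j = suffix → inc < m →
      aLoop merged m (PySem.List.enumerate suffix (j : Int)) lines inc =
        (lines ++ (((PySem.List.enumerate suffix (j : Int)).filter (fun p => pvIsRev p.2)).take
              (m - inc).toNat).map (fun p => bEntry p.1 p.2)
            ++ (if (m - inc).toNat <
                  ((PySem.List.enumerate suffix (j : Int)).filter (fun p => pvIsRev p.2)).length then
                  [pvRemMsg m
                    ((((PySem.List.enumerate suffix (j : Int)).filter
                        (fun p => pvIsRev p.2)).length : Int) - (m - inc))]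
                else []),
          inc + min (m - inc)
            (((PySem.List.enumerate suffix (j : Int)).filter (fun p => pvIsRev p.2)).length : Int)) := by
  intro suffix
  induction suffix with
  | nil =>
    intro j lines inc _ hlt
    simp [PySem.List.enumerate_nil, aLoop]
    omega
  | cons c tl ih =>
    intro j lines inc hdrop hlt
    have hdrop' : merged.drop (j + 1) = tl := by rw [← List.tail_drop, hdrop]; rfl
    have hcast : (j : Int) + 1 = ((j + 1 : Nat) : Int) := by push_cast; ring
    rw [PySem.List.enumerate_cons]
    by_cases hc : pvIsRev c = true
    · have hc' : PySem.Set.contains pvReviewKinds (pvGet c "constraint_kind" "") = true := by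
        simpa [pvIsRev] using hc
      simp only [aLoop, hc', Bool.not_true]
      rw [if_neg (by simp), if_neg (not_le.mpr hlt)]
      rw [List.filter_cons_of_pos (by simpa using hc)]
      by_cases h2 : inc + 1 < m
      · rw [hcast, ih (j + 1) _ (inc + 1) hdrop' h2]
        obtain ⟨k', hk'⟩ : ∃ k', (m - inc).toNat = k' + 1 := ⟨(m - inc).toNat - 1, by omega⟩
        have hk2 : (m - (inc + 1)).toNat = k' := by omega
        rw [hk', hk2, List.take_succ_cons, List.map_cons]
        set rv' := (PySem.List.enumerate tl ((j + 1 : Nat) : Int)).filter (fun p => pvIsRev p.2) with hrv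
        simp only [Prod.mk.injEq, List.length_cons]
        constructor
        · have hif : (if k' + 1 < rv'.length + 1 then
                [pvRemMsg m (((rv'.length + 1 : Nat) : Int) - (m - inc))] else [])
              = (if k' < rv'.length then [pvRemMsg m ((rv'.length : Int) - (m - (inc + 1)))] else []) := by
            by_cases hlen : k' < rv'.length
            · rw [if_pos (by omega), if_pos hlen]
              have : ((rv'.length + 1 : Nat) : Int) - (m - inc) = (rv'.length : Int) - (m - (inc + 1)) := by
                push_cast; ring
              rw [this]
            · rw [if_neg (by omega), if_neg hlen]
          rw [hif]
          simp [List.append_assoc, bEntry]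
        · push_cast
          omega
      · have hm2 : m ≤ inc + 1 := not_lt.mp h2
        rw [hcast, aLoop_full merged m tl (j + 1) _ (inc + 1) hdrop' hm2]
        have hn : ((PySem.List.enumerate tl ((j + 1 : Nat) : Int)).filter
            (fun p => pvIsRev p.2)).length = tl.countP pvIsRev := filterEnum_length tl _
        set rv' := (PySem.List.enumerate tl ((j + 1 : Nat) : Int)).filter (fun p => pvIsRev p.2) with hrv
        have hk1 : (m - inc).toNat = 1 := by omega
        rw [hk1, List.take_succ_cons, List.take_zero, List.map_cons, List.map_nil]
        rw [show ((((j : Nat) : Int), c) :: rv').length = rv'.length + 1 from rfl]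
        by_cases h0 : tl.countP pvIsRev = 0
        · rw [if_pos h0, if_neg (show ¬(1 < rv'.length + 1) from by omega)]
          simp only [Prod.mk.injEq]
          refine ⟨by simp only [List.append_nil]; rfl, by push_cast; omega⟩
        · rw [if_neg h0, if_pos (show 1 < rv'.length + 1 from by omega)]
          have harg : ((tl.countP pvIsRev : Nat) : Int) = ((rv'.length + 1 : Nat) : Int) - (m - inc) := by
            push_cast; omega
          simp only [Prod.mk.injEq]
          refine ⟨?_, by push_cast; omega⟩
          rw [harg]
          simp only [List.append_assoc, List.cons_append]
          rfl
    · have hc' : PySem.Set.contains pvReviewKinds (pvGet c "constraint_kind" "") = false := by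
        simpa [pvIsRev] using hc
      simp only [aLoop, hc', Bool.not_false]
      rw [if_pos trivial]
      rw [List.filter_cons_of_neg (by simpa using hc)]
      rw [hcast, ih (j + 1) lines inc hdrop' hlt]

lemma enum_snd_mem (merged : List (List (String × String)))
    (p : Int × List (String × String)) (hp : p ∈ PySem.List.enumerate merged 0) :
    p.2 ∈ merged := by
  rcases (PySem.List.mem_enumerate_iff merged 0 p).mp hp with ⟨k, hk, rfl⟩
  exact List.getElem_mem hk

-- ===== the tight direction: inside D_ the outputs always differ =====
-- Mechanism: on Dom inputs the character '无' occurs in A's output (only via the leftover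
-- "（无需审查的约束条目）" line) and never in B's output.

lemma pv_digitChar_ne (k : Nat) (hk : k < 10) : Nat.digitChar k ≠ '无' := by
  interval_cases k <;> decide

lemma pv_toDigitsCore_mem (fuel n : Nat) (ds : List Char) (c : Char)
    (h : c ∈ Nat.toDigitsCore 10 fuel n ds) : (∃ k, k < 10 ∧ c = Nat.digitChar k) ∨ c ∈ ds := by
  induction fuel generalizing n ds with
  | zero => right; simpa [Nat.toDigitsCore] using h
  | succ f ih =>
    rw [Nat.toDigitsCore] at h
    by_cases h0 : n / 10 = 0
    · simp only [h0] at h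
      rcases List.mem_cons.mp h with h1 | h1
      · exact Or.inl ⟨n % 10, Nat.mod_lt _ (by norm_num), h1⟩
      · exact Or.inr h1
    · simp only [if_neg h0] at h
      rcases ih _ _ h with h1 | h1
      · exact Or.inl h1
      · rcases List.mem_cons.mp h1 with h2 | h2
        · exact Or.inl ⟨n % 10, Nat.mod_lt _ (by norm_num), h2⟩
        · exact Or.inr h2

lemma pv_toStr_noWu (n : Int) : '无' ∉ (PySem.Int.toStr n).toList := by
  rw [PySem.Int.toList_toStr]
  intro h
  unfold PySem.Int.toChars at h
  by_cases hn : n < 0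
  · rw [if_pos hn] at h
    rcases List.mem_cons.mp h with h1 | h1
    · exact absurd h1.symm (by decide)
    · rw [Nat.toDigits] at h1
      rcases pv_toDigitsCore_mem _ _ _ _ h1 with ⟨k, hk, hc⟩ | h2
      · exact pv_digitChar_ne k hk hc.symm
      · simp at h2
  · rw [if_neg hn] at h
    rw [Nat.toDigits] at h
    rcases pv_toDigitsCore_mem _ _ _ _ h with ⟨k, hk, hc⟩ | h2
    · exact pv_digitChar_ne k hk hc.symm
    · simp at h2

lemma pv_dom_noWu (s : String) (hs : pvDomStr s = true) : '无' ∉ s.toList := by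
  intro h
  have := List.all_eq_true.mp hs _ h
  exact absurd this (by decide)

lemma pv_pvGet_noWu (d : List (String × String)) (hd : ∀ pr ∈ d, pvDomStr pr.2 = true)
    (k : String) : '无' ∉ (pvGet d k "").toList := by
  unfold pvGet PySem.Dict.getD PySem.Dict.get?
  cases hf : List.find? (fun p => p.1 == k) (PySem.Dict.mk d).items with
  | none => decide
  | some pr =>
    simpa using pv_dom_noWu _ (hd pr (List.mem_of_find?_eq_some hf))

lemma pv_ellipsis_noWu (P : Prop) [Decidable P] :
    '无' ∉ ((if P then "..." else "") : String).toList := by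
  by_cases hP : P
  · rw [if_pos hP]; decide
  · rw [if_neg hP]; decide

lemma pv_slice_noWu (s : String) (hs : '无' ∉ s.toList) (a b : Option Int) :
    '无' ∉ (PySem.Str.slice s a b).toList := by
  intro h
  rw [PySem.Str.toList_slice, PySem.Chars.slice_eq_listSlice] at h
  exact hs (PySem.List.mem_of_mem_slice _ _ _ h)

lemma pv_bEntry_noWu (idx : Int) (d : List (String × String))
    (hd : ∀ pr ∈ d, pvDomStr pr.2 = true) : '无' ∉ (bEntry idx d).toList := by
  unfold bEntry
  simp only [String.toList_append, List.mem_append]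
  push_neg
  refine ⟨⟨⟨⟨⟨⟨⟨⟨⟨⟨⟨by decide, fun h => pv_toStr_noWu idx h⟩, by decide⟩,
      fun h => pv_pvGet_noWu d hd _ h⟩, by decide⟩, fun h => pv_pvGet_noWu d hd _ h⟩, by decide⟩,
      fun h => pv_slice_noWu _ (pv_pvGet_noWu d hd _) _ _ h⟩,
      fun h => pv_ellipsis_noWu _ h⟩, by decide⟩,
      fun h => pv_slice_noWu _ (pv_pvGet_noWu d hd _) _ _ h⟩,
      fun h => pv_ellipsis_noWu _ h⟩

lemma pv_mem_join (c : Char) (sep : List Char) (ls : List (List Char))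
    (h : c ∈ PySem.Chars.join sep ls) : c ∈ sep ∨ ∃ l ∈ ls, c ∈ l := by
  induction ls with
  | nil => simp [PySem.Chars.join, List.intercalate] at h
  | cons a tl ih =>
    cases tl with
    | nil =>
      rw [PySem.Chars.join_singleton] at h
      exact Or.inr ⟨a, by simp, h⟩
    | cons b tl2 =>
      rw [PySem.Chars.join_cons_cons] at h
      rcases List.mem_append.mp h with h1 | h1
      · rcases List.mem_append.mp h1 with h2 | h2
        · exact Or.inr ⟨a, by simp, h2⟩
        · exact Or.inl h2
      · rcases ih h1 with h2 | ⟨l, hl, hc⟩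
        · exact Or.inl h2
        · exact Or.inr ⟨l, by simp [hl], hc⟩

-- ===== VERDICT (by name: the statement is the Claim_ definition above) =====
theorem build_synthesis_summary_py_spec : Claim_unchanged_build_synthesis_summary_py := by
  intro merged m _hDom hnd
  show build_synthesis_summary_py merged m = build_synthesis_summary_py_alt merged m
  by_cases hall : merged.countP pvIsRev = 0
  · have hnone : ∀ c ∈ merged, pvIsRev c = false := by
      intro c hc
      by_contra h
      exact absurd hall (by simp [List.countP_eq_zero]; exact ⟨c, hc, by simpa using h⟩)
    have hfilt : (PySem.List.enumerate merged 0).filter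
        (fun ic => PySem.Set.contains pvReviewKinds (pvGet ic.2 "constraint_kind" "")) = [] := by
      rw [List.filter_eq_nil_iff]
      intro p hp
      simpa [pvIsRev] using hnone p.2 (enum_snd_mem merged p hp)
    simp only [build_synthesis_summary_py, build_synthesis_summary_py_alt]
    rw [aLoop_none merged m merged 0 [pvHeader] 0 hnone, hfilt]
    simp
  · have hex : ∃ c ∈ merged, pvIsRev c = true := by
      by_contra h
      push_neg at h
      exact hall (List.countP_eq_zero.mpr (by simpa using h))
    have hm : 0 < m := by
      by_contra h
      push_neg at h
      exact hnd ⟨h, hex⟩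
    have hrun := aLoop_run merged m merged 0 [pvHeader] 0 (by simp) (by omega)
    have hz : ((0 : Nat) : Int) = 0 := rfl
    rw [hz] at hrun
    have hlen : ((PySem.List.enumerate merged 0).filter (fun p => pvIsRev p.2)).length
        = merged.countP pvIsRev := filterEnum_length merged 0
    set rvAll := (PySem.List.enumerate merged 0).filter (fun p => pvIsRev p.2) with hrvAll
    have hne : rvAll ≠ [] := by
      intro h0
      exact hall (by rw [← hlen, h0]; rfl)
    simp only [build_synthesis_summary_py, build_synthesis_summary_py_alt]
    rw [hrun]
    have hfeq : (fun ic : Int × List (String × String) =>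
        PySem.Set.contains pvReviewKinds (pvGet ic.2 "constraint_kind" "")) = (fun p => pvIsRev p.2) := rfl
    rw [hfeq, ← hrvAll]
    have hinc : ((0 + min (m - 0) (rvAll.length : Int)) == 0) = false := by
      have : rvAll.length ≠ 0 := fun h => hne (List.length_eq_zero_iff.mp h)
      rw [beq_eq_false_iff_ne]
      omega
    rw [hinc]
    simp only [Bool.false_eq_true, if_false]
    have hempty : rvAll.isEmpty = false := by simpa [List.isEmpty_iff] using hne
    rw [hempty]
    simp only [Bool.false_eq_true, if_false]
    rw [PySem.List.slice_to rvAll (le_of_lt hm)]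
    have hm0 : m - 0 = m := by ring
    rw [hm0]
    by_cases hbig : m.toNat < rvAll.length
    · rw [if_pos hbig, if_pos (by omega)]
      have harg : (rvAll.length : Int) - m = (rvAll.length : Int) - m := rfl
      simp only [pvRemMsg]
      rfl
    · rw [if_neg hbig, if_neg (by omega)]
      rfl

set_option maxRecDepth 8192 in
theorem build_synthesis_summary_py_changed : Claim_changed_build_synthesis_summary_py := by
  unfold Claim_changed_build_synthesis_summary_py; decide

theorem build_synthesis_summary_py_tight : Claim_exact_build_synthesis_summary_py := by
  intro merged m hDom hD
  obtain ⟨hm0, c0, hc0mem, hc0⟩ := hD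
  have hdomAll : ∀ d ∈ merged, ∀ pr ∈ d, pvDomStr pr.2 = true := by
    intro d hdm pr hpr
    have h1 := (Bool.and_eq_true _ _).mp hDom |>.1
    have h2 := List.all_eq_true.mp h1 d hdm
    have h3 := List.all_eq_true.mp h2 pr hpr
    exact ((Bool.and_eq_true _ _).mp h3).2
  have hcnt : merged.countP pvIsRev ≠ 0 := by
    intro h
    exact List.countP_eq_zero.mp h c0 hc0mem hc0
  -- A's value
  have hfull := aLoop_full merged m merged 0 [pvHeader] 0 (by simp) hm0
  have hz : ((0 : Nat) : Int) = 0 := rfl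
  rw [hz] at hfull
  have hA : build_synthesis_summary_py merged m
      = PySem.Str.join "\n" [pvHeader, pvRemMsg m (merged.countP pvIsRev : Int), pvEmptyMsg] := by
    simp only [build_synthesis_summary_py]
    rw [hfull, if_neg hcnt]
    norm_num
  -- B's value
  have hlen : ((PySem.List.enumerate merged 0).filter (fun p => pvIsRev p.2)).length
      = merged.countP pvIsRev := filterEnum_length merged 0
  set rvAll := (PySem.List.enumerate merged 0).filter (fun p => pvIsRev p.2) with hrvAll
  have hne : rvAll ≠ [] := by
    intro h0
    exact hcnt (by rw [← hlen, h0]; rfl)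
  have hempty : rvAll.isEmpty = false := by simpa [List.isEmpty_iff] using hne
  have hbig : ((rvAll.length : Int) > m) := by
    have : rvAll.length ≠ 0 := fun h => hne (List.length_eq_zero_iff.mp h)
    omega
  have hB : build_synthesis_summary_py_alt merged m
      = PySem.Str.join "\n" (pvHeader ::
          ((PySem.List.slice rvAll none (some m)).map (fun ic => bEntry ic.1 ic.2)
            ++ ["\n... 还有 " ++ PySem.Int.toStr ((rvAll.length : Int) - m)
                ++ " 条未列出（已达 " ++ PySem.Int.toStr m ++ " 条上限）"])) := by
    simp only [build_synthesis_summary_py_alt]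
    rw [show (fun ic : Int × List (String × String) =>
        PySem.Set.contains pvReviewKinds (pvGet ic.2 "constraint_kind" "")) = (fun p => pvIsRev p.2) from rfl]
    rw [← hrvAll, hempty, if_pos hbig]
    norm_num
  intro heq
  have hWA : '无' ∈ (build_synthesis_summary_py merged m).toList := by
    rw [hA, PySem.Str.toList_join]
    rw [show (List.map String.toList [pvHeader, pvRemMsg m (merged.countP pvIsRev : Int), pvEmptyMsg])
        = [pvHeader.toList, (pvRemMsg m (merged.countP pvIsRev : Int)).toList, pvEmptyMsg.toList] from rfl]
    rw [PySem.Chars.join_cons_cons, PySem.Chars.join_cons_cons, PySem.Chars.join_singleton]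
    simp only [List.mem_append]
    right; right
    decide
  have hWB : '无' ∉ (build_synthesis_summary_py_alt merged m).toList := by
    rw [hB, PySem.Str.toList_join]
    intro h
    rcases pv_mem_join _ _ _ h with h1 | ⟨l, hl, hc⟩
    · exact absurd h1 (by decide)
    · rcases List.mem_map.mp hl with ⟨part, hpart, rfl⟩
      rcases List.mem_cons.mp hpart with rfl | hpart2
      · exact absurd hc (by decide)
      · rcases List.mem_append.mp hpart2 with hpart3 | hpart3
        · rcases List.mem_map.mp hpart3 with ⟨p, hp, rfl⟩
          have hpm : p ∈ rvAll := PySem.List.mem_of_mem_slice _ _ _ hp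
          have hp2 : p.2 ∈ merged := enum_snd_mem merged p (List.mem_filter.mp hpm).1
          exact pv_bEntry_noWu p.1 p.2 (hdomAll p.2 hp2) hc
        · rcases List.mem_singleton.mp hpart3 with rfl
          simp only [String.toList_append, List.mem_append] at hc
          rcases hc with ((((hc | hc) | hc) | hc) | hc)
          · exact absurd hc (by decide)
          · exact pv_toStr_noWu _ hc
          · exact absurd hc (by decide)
          · exact pv_toStr_noWu _ hc
          · exact absurd hc (by decide)
  rw [heq] at hWA
  exact hWB hWA
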